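-- pv_equiv track=rewrite | github.com/ialdaba/Python-SQL-HW | Encoder-Decoder-Proj/ialdaba_205_P5.py | message_statistics
-- ===== SOURCE A (Python) =====
-- def message_statistics(message, encoded_message):
--
--     d = {}
--     list(message)
--     list(encoded_message)
--
--     for letter in message:
--         counta = 0
--         countb = 0
--         for element in message:
--             if element == letter:
--                 counta += 1
--         stat = [counta, countb]
--         d[letter] = stat
--
--     for letter in encoded_message:
--         counta = 0
--         countb = 0
--         for item in message:
--             if letter == item:
--                 counta += 1
--         for element in encoded_message:
--             if element == letter:
--                 countb += 1
--         stat = [counta, countb]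
--         d[letter] = stat
--
--     return d
-- ===== SOURCE B (Python) =====
-- def message_statistics(message, encoded_message):
--     d = {}
--     for c in message:
--         d.setdefault(c, [0, 0])[0] += 1
--     for c in encoded_message:
--         d.setdefault(c, [0, 0])[1] += 1
--     return d
-- ===== Notes on version B (the rewrite author's own statement) =====
-- stated objective: faster
-- what changed: Replaces A's nested rescans (for every character of each string, re-count it by scanning the whole strings again) with two single linear passes that accumulate both counts in the dict in place via setdefault.
import Mathlib
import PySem

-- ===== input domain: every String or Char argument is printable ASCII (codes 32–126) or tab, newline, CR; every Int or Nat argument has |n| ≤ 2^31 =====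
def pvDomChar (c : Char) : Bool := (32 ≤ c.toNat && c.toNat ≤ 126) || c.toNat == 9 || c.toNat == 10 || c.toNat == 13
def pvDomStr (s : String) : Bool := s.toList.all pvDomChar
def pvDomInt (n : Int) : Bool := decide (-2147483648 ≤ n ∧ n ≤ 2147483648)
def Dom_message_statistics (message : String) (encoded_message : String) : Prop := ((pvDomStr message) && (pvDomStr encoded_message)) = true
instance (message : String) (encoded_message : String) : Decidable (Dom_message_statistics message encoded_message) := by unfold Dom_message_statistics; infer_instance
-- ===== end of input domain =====

-- B replaces A's nested counting rescans by two single passes that accumulate per-character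
-- counts in the dict in place (objective: faster, O(n+m) instead of O((n+m)^2)).

-- ===== PORT A =====
-- Python's `list(message)` / `list(encoded_message)` lines discard their results: no-ops, not ported.
def message_statistics (message : String) (encoded_message : String) : List (String × List Int) :=
  let m := message.toList
  let e := encoded_message.toList
  let d : PySem.Dict String (List Int) := PySem.Dict.empty
  let d := m.foldl (fun d letter =>
    let counta := m.foldl (fun counta element =>
      if element == letter then counta + 1 else counta) (0 : Int)
    let countb := (0 : Int)
    let stat := [counta, countb]
    d.insert (String.singleton letter) stat) d
  let d := e.foldl (fun d letter =>
    let counta := m.foldl (fun counta item =>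
      if letter == item then counta + 1 else counta) (0 : Int)
    let countb := e.foldl (fun countb element =>
      if element == letter then countb + 1 else countb) (0 : Int)
    let stat := [counta, countb]
    d.insert (String.singleton letter) stat) d
  d.items

-- ===== PORT B =====
-- `d.setdefault(c, [0, 0])[i] += 1` = modify with default [0,0], setting index i to old+1.
def message_statistics_alt (message : String) (encoded_message : String) : List (String × List Int) :=
  let d : PySem.Dict String (List Int) := PySem.Dict.empty
  let d := message.toList.foldl (fun d c =>
    d.modify (String.singleton c) [0, 0] (fun v => v.set 0 (v.getD 0 0 + 1))) d
  let d := encoded_message.toList.foldl (fun d c =>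
    d.modify (String.singleton c) [0, 0] (fun v => v.set 1 (v.getD 1 0 + 1))) d
  d.items

-- ===== PRECONDITION & SPEC =====
def Spec_message_statistics (message : String) (encoded_message : String) (out : List (String × List Int)) : Prop := out = message_statistics_alt message encoded_message
instance (message : String) (encoded_message : String) (out : List (String × List Int)) : Decidable (Spec_message_statistics message encoded_message out) := by unfold Spec_message_statistics; infer_instance

-- ===== CLAIM (what is proved, stated in full; the proofs are below) =====
def Claim_equal_message_statistics : Prop := ∀ (message : String) (encoded_message : String), Dom_message_statistics message encoded_message → Spec_message_statistics message encoded_message (message_statistics message encoded_message)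

-- ===== LEMMAS AND PROOFS =====

lemma skey_inj {a c : Char} (h : String.singleton a = String.singleton c) : a = c := by
  have := congrArg String.toList h; simpa using this

-- A's loop shape: a fold of inserts whose value depends only on the loop char.
lemma foldl_insert_getD (l : List Char) (v : Char → List Int)
    (d : PySem.Dict String (List Int)) (c : Char) (z : List Int) :
    (List.foldl (fun d x => d.insert (String.singleton x) (v x)) d l).getD (String.singleton c) z
      = if c ∈ l then v c else d.getD (String.singleton c) z := by
  induction l generalizing d with
  | nil => simp
  | cons a t ih =>
    simp only [List.foldl_cons, ih, List.mem_cons]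
    by_cases hct : c ∈ t
    · simp [hct]
    · by_cases hca : c = a
      · subst hca; simp [hct, PySem.Dict.getD_insert_self]
      · have hne : String.singleton c ≠ String.singleton a := fun h => hca (skey_inj h)
        simp [hct, hca, PySem.Dict.getD_insert_of_ne _ _ _ hne]

-- B's loop shape: a fold of modifies applies g once per occurrence of the key's char.
lemma foldl_modify_getD (l : List Char) (g : List Int → List Int) (z : List Int)
    (d : PySem.Dict String (List Int)) (c : Char) :
    (List.foldl (fun d x => d.modify (String.singleton x) z g) d l).getD (String.singleton c) z
      = g^[l.count c] (d.getD (String.singleton c) z) := by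
  induction l generalizing d with
  | nil => simp
  | cons a t ih =>
    simp only [List.foldl_cons, ih]
    by_cases hca : c = a
    · subst hca
      rw [PySem.Dict.getD_modify_self, List.count_cons_self, Function.iterate_succ_apply]
    · have hne : String.singleton c ≠ String.singleton a := fun h => hca (skey_inj h)
      rw [PySem.Dict.getD_modify_of_ne _ _ _ hne]
      have : ¬ a = c := fun h => hca h.symm
      simp [this]

lemma iter_set0 (n : Nat) (a b : Int) :
    (fun v : List Int => v.set 0 (v.getD 0 0 + 1))^[n] [a, b] = [a + n, b] := by
  induction n generalizing a with
  | zero => simp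
  | succ k ih =>
    rw [Function.iterate_succ_apply,
      show ([a, b].set 0 ([a, b].getD 0 0 + 1)) = [a + 1, b] from rfl, ih]
    congr 1
    push_cast; ring

lemma iter_set1 (n : Nat) (a b : Int) :
    (fun v : List Int => v.set 1 (v.getD 1 0 + 1))^[n] [a, b] = [a, b + n] := by
  induction n generalizing b with
  | zero => simp
  | succ k ih =>
    rw [Function.iterate_succ_apply,
      show ([a, b].set 1 ([a, b].getD 1 0 + 1)) = [a, b + 1] from rfl, ih]
    congr 2
    push_cast; ring

-- Two association lists with the same (duplicate-free) key sequence and the same lookups are equal.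
lemma assoc_eq (l l' : List (String × List Int))
    (hn : (l.map Prod.fst).Nodup) (hk : l.map Prod.fst = l'.map Prod.fst)
    (h : ∀ k ∈ l.map Prod.fst,
      (PySem.Dict.mk l).getD k [0, 0] = (PySem.Dict.mk l').getD k [0, 0]) : l = l' := by
  induction l generalizing l' with
  | nil => simpa [eq_comm] using congrArg List.length hk
  | cons p t ih =>
    cases l' with
    | nil => simpa using congrArg List.length hk
    | cons q t' =>
      obtain ⟨p1, p2⟩ := p; obtain ⟨q1, q2⟩ := q
      simp only [List.map_cons, List.cons.injEq] at hk
      obtain ⟨hk1, hk2⟩ := hk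
      subst hk1
      have hv : p2 = q2 := by
        have := h p1 (by simp)
        simpa [PySem.Dict.getD_eq_get?_getD, PySem.Dict.get?_mk_cons] using this
      subst hv
      have hn' := hn
      simp only [List.map_cons, List.nodup_cons] at hn'
      have ht : t = t' := by
        refine ih t' hn'.2 hk2 ?_
        intro k hkmem
        have hne : (p1 == k) = false := by
          simp only [beq_eq_false_iff_ne, ne_eq]
          intro he; exact hn'.1 (he ▸ hkmem)
        have := h k (by simp [hkmem])
        simpa [PySem.Dict.getD_eq_get?_getD, PySem.Dict.get?_mk_cons, hne] using this
      rw [ht]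

-- Dict-level packaging of assoc_eq (defeq: keys/items of a mk).
lemma dict_eq_of (d d' : PySem.Dict String (List Int)) (hn : d.keys.Nodup)
    (hk : d.keys = d'.keys) (h : ∀ k ∈ d.keys, d.getD k [0, 0] = d'.getD k [0, 0]) :
    d.items = d'.items :=
  assoc_eq d.items d'.items hn hk h

lemma count_beq_comm (c : Char) (l : List Char) :
    l.countP (fun x => c == x) = l.count c := by
  simp [List.count, BEq.comm]

lemma main_eq (message encoded_message : String) :
    message_statistics message encoded_message = message_statistics_alt message encoded_message := by
  simp only [message_statistics, message_statistics_alt]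
  refine dict_eq_of _ _ ?_ ?_ ?_
  · exact PySem.Dict.nodup_keys_foldl_insert_key _ String.singleton _ _
      (PySem.Dict.nodup_keys_foldl_insert_key _ String.singleton _ _ PySem.Dict.nodup_keys_empty)
  · rw [PySem.Dict.keys_foldl_insert_key, PySem.Dict.keys_foldl_insert_key,
      PySem.Dict.keys_foldl_modify_key, PySem.Dict.keys_foldl_modify_key]
  · intro k hkmem
    rw [PySem.Dict.keys_foldl_insert_key, PySem.Dict.keys_foldl_insert_key,
      PySem.Dict.keys_empty] at hkmem
    rw [PySem.Set.mem_update, PySem.Set.mem_update] at hkmem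
    have hc : ∃ c : Char, k = String.singleton c ∧ (c ∈ message.toList ∨ c ∈ encoded_message.toList) := by
      rcases hkmem with (h | h) | h
      · cases h
      · obtain ⟨c, hc, he⟩ := List.mem_map.mp h; exact ⟨c, he.symm, Or.inl hc⟩
      · obtain ⟨c, hc, he⟩ := List.mem_map.mp h; exact ⟨c, he.symm, Or.inr hc⟩
    obtain ⟨c, rfl, hmem⟩ := hc
    show PySem.Dict.getD _ (String.singleton c) [0, 0] = PySem.Dict.getD _ (String.singleton c) [0, 0]
    rw [foldl_insert_getD, foldl_insert_getD, foldl_modify_getD, foldl_modify_getD,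
      PySem.Dict.getD_empty, iter_set0, iter_set1]
    simp only [PySem.List.foldl_count_if, zero_add, count_beq_comm, List.count]
    by_cases hE : c ∈ encoded_message.toList
    · simp [hE]
    · have h0 : encoded_message.toList.countP (fun x => x == c) = 0 :=
        List.countP_eq_zero.mpr (fun x hx => by
          simp only [beq_iff_eq]
          rintro rfl; exact hE hx)
      have hM : c ∈ message.toList := hmem.resolve_right hE
      simp [hE, hM, h0]

-- ===== VERDICT (by name: the statement is the Claim_ definition above) =====
theorem message_statistics_spec : Claim_equal_message_statistics := by
  intro message encoded_message _
  unfold Spec_message_statistics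
  exact main_eq message encoded_message
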